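-- pv_equiv track=rewrite | github.com/nonaninona/algorithm | 백준/Silver/17615. 볼 모으기/볼 모으기.py | check_count
-- ===== SOURCE A (Python) =====
-- def check_count(target, ball_list):
--     ret = 0
--     isFirst = True
--     for b in ball_list:
--         if b != target:
--             isFirst = False
--         if not isFirst and b == target:
--             ret += 1
--     return ret
-- ===== SOURCE B (Python) =====
-- def check_count(target, ball_list):
--     total = ball_list.count(target)
--     prefix = 0
--     for b in ball_list:
--         if b != target:
--             break
--         prefix += 1
--     return total - prefix
-- ===== Notes on version B (the rewrite author's own statement) =====
-- stated objective: alternative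
-- what changed: Replaces A's single flag-tracking pass with an arithmetic formulation: count all target balls, subtract the length of the leading run of targets.
import Mathlib
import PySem

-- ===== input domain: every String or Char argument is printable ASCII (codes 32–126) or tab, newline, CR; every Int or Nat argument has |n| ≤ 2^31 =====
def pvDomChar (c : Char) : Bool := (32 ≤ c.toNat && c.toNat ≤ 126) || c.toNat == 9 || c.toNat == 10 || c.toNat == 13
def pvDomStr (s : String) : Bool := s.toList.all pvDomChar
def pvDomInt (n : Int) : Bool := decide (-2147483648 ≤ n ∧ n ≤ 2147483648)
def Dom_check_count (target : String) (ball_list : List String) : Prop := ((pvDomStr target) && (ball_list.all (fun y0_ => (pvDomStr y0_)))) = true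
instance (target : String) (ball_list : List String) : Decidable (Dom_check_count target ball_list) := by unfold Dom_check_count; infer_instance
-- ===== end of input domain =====

-- ===== PORT A =====
-- flag-tracking pass: count targets seen after isFirst has become false
def pvStepA (target : String) (st : Int × Bool) (b : String) : Int × Bool :=
  let isFirst := if b ≠ target then false else st.2
  let ret := if ¬ isFirst ∧ b = target then st.1 + 1 else st.1
  (ret, isFirst)

def check_count (target : String) (ball_list : List String) : Int :=
  (ball_list.foldl (pvStepA target) (0, true)).1

-- ===== PORT B =====
-- B: total count of target minus length of leading run of target (two separate passes)
def pvPrefixLen (target : String) : List String → Int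
  | [] => 0
  | b :: rest => if b ≠ target then 0 else pvPrefixLen target rest + 1

def check_count_alt (target : String) (ball_list : List String) : Int :=
  (PySem.List.count ball_list target : Int) - pvPrefixLen target ball_list

-- ===== PRECONDITION & SPEC =====
def Spec_check_count (target : String) (ball_list : List String) (out : Int) : Prop := out = check_count_alt target ball_list
instance (target : String) (ball_list : List String) (out : Int) : Decidable (Spec_check_count target ball_list out) := by unfold Spec_check_count; infer_instance

-- ===== CLAIM (what is proved, stated in full; the proofs are below) =====
def Claim_equal_check_count : Prop := ∀ (target : String) (ball_list : List String), Dom_check_count target ball_list → Spec_check_count target ball_list (check_count target ball_list)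

-- ===== LEMMAS AND PROOFS =====

theorem pvStepA_false (target b : String) (r : Int) :
    pvStepA target (r, false) b = ((if b = target then r + 1 else r), false) := by
  by_cases hb : b = target <;> simp [pvStepA, hb]

theorem pvStepA_true (target b : String) (r : Int) :
    pvStepA target (r, true) b = if b = target then (r, true) else (r, false) := by
  by_cases hb : b = target <;> simp [pvStepA, hb]

-- once isFirst is false, A's loop just adds the count of target
theorem pvFoldFalse (target : String) (l : List String) (r : Int) :
    (l.foldl (pvStepA target) (r, false)).1 = r + (PySem.List.count l target : Int) := by
  induction l generalizing r with
  | nil => simp [PySem.List.count_eq]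
  | cons b rest ih =>
    rw [List.foldl_cons, pvStepA_false]
    by_cases hb : b = target
    · rw [if_pos hb, ih]
      simp [PySem.List.count_eq, List.count_cons, hb]
      push_cast; ring
    · rw [if_neg hb, ih]
      simp [PySem.List.count_eq, List.count_cons, hb]

theorem pvMain (target : String) (l : List String) :
    (l.foldl (pvStepA target) (0, true)).1
      = (PySem.List.count l target : Int) - pvPrefixLen target l := by
  induction l with
  | nil => simp [pvPrefixLen, PySem.List.count_eq]
  | cons b rest ih =>
    rw [List.foldl_cons, pvStepA_true]
    by_cases hb : b = target
    · rw [if_pos hb, ih]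
      simp [PySem.List.count_eq, List.count_cons, pvPrefixLen, hb]
    · rw [if_neg hb, pvFoldFalse]
      simp [PySem.List.count_eq, List.count_cons, pvPrefixLen, hb]

-- ===== VERDICT (by name: the statement is the Claim_ definition above) =====
theorem check_count_spec : Claim_equal_check_count := by
  intro target ball_list _
  unfold Spec_check_count check_count check_count_alt
  exact pvMain target ball_list
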